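-- pv_equiv track=rewrite | github.com/mgaitan/venganzas | scripts/scrape_vdp.py | parse_years_arg
-- ===== SOURCE A (Python) =====
-- from typing import Dict, List, Optional, Tuple
--
-- def parse_years_arg(value: str) -> List[int]:
--     years: List[int] = []
--     seen = set()
--     for part in value.split(","):
--         part = part.strip()
--         if not part:
--             continue
--         if "-" in part:
--             start_raw, end_raw = part.split("-", 1)
--             start = int(start_raw)
--             end = int(end_raw)
--             step = 1 if start <= end else -1
--             for year in range(start, end + step, step):
--                 if year not in seen:
--                     years.append(year)
--                     seen.add(year)
--         else:
--             year = int(part)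
--             if year not in seen:
--                 years.append(year)
--                 seen.add(year)
--     return years
-- ===== SOURCE B (Python) =====
-- def parse_years_arg(value):
--     # Build the result back-to-front: walk the parts right-to-left and merge each
--     # chunk in front of the accumulated suffix result, dropping from the suffix the
--     # years the chunk already contains (ranges/singletons are duplicate-free, so
--     # first occurrences win) -- no global seen-set.
--     result = []
--     for part in reversed(value.split(",")):
--         part = part.strip()
--         if not part:
--             continue
--         if "-" in part:
--             start_raw, end_raw = part.split("-", 1)
--             start = int(start_raw)
--             end = int(end_raw)
--             step = 1 if start <= end else -1
--             ys = list(range(start, end + step, step))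
--         else:
--             ys = [int(part)]
--         cur = set(ys)
--         result = ys + [y for y in result if y not in cur]
--     return result
-- ===== Notes on version B (the rewrite author's own statement) =====
-- stated objective: alternative
-- what changed: B iterates over the parts in reverse and builds the result back-to-front, merging each chunk in front of the suffix result and filtering the suffix against the current chunk, instead of A's forward loop with a global seen-set and per-year guarded appends.
import Mathlib
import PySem

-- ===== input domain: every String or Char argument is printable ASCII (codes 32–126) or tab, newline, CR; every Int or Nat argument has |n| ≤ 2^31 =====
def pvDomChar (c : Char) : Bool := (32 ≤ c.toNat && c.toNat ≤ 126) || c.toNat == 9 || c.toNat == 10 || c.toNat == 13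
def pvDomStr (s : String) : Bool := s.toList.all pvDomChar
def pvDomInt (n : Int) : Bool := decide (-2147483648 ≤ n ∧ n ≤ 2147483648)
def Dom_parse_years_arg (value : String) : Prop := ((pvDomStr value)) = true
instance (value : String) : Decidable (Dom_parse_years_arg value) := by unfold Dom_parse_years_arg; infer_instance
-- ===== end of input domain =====

-- B walks the parts in reverse and builds the result back-to-front, merging each chunk in
-- front of the suffix and filtering the suffix against it, instead of A's forward loop with
-- a global seen-set; an alternative decomposition, same return value.

-- ===== PORT A =====
-- A's inner dedup step: append year if unseen, record it in seen.
def pyA_add (st : List Int × PySem.Set Int) (y : Int) : List Int × PySem.Set Int :=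
  if PySem.Set.contains st.2 y then st else (st.1 ++ [y], PySem.Set.add st.2 y)

-- A's loop body after 'part = part.strip()'; none = the int() call raises ValueError
def pyA_part (st : List Int × PySem.Set Int) (part : String) : Option (List Int × PySem.Set Int) :=
  if PySem.Str.len part = 0 then some st
  else if PySem.Str.isIn "-" part then
    match PySem.Str.splitMax? part "-" 1 with
    | some [start_raw, end_raw] =>
      match PySem.Int.ofStr? start_raw, PySem.Int.ofStr? end_raw with
      | some start, some «end» =>
        let step : Int := if start ≤ «end» then 1 else -1
        some ((PySem.List.pyRange start («end» + step) step).foldl pyA_add st)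
      | _, _ => none
    | _ => none
  else
    match PySem.Int.ofStr? part with
    | some y => some (pyA_add st y)
    | none => none

def parse_years_arg (value : String) : List Int :=
  ((((PySem.Str.split? value ",").getD []).foldl
      (fun acc part => acc.bind (fun st => pyA_part st (PySem.Str.strip part))) (some ([], []))).getD ([], [])).1

-- ===== PORT B =====
-- B's loop body after 'part = part.strip()': merge the part's chunk ys in front of the
-- accumulated suffix result, dropping years already in ys; none = int() raises ValueError
def pyB_step (result : List Int) (part : String) : Option (List Int) :=
  if PySem.Str.len part = 0 then some result
  else if PySem.Str.isIn "-" part then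
    match PySem.Str.splitMax? part "-" 1 with
    | some [start_raw, end_raw] =>
      match PySem.Int.ofStr? start_raw, PySem.Int.ofStr? end_raw with
      | some start, some «end» =>
        let step : Int := if start ≤ «end» then 1 else -1
        let ys := PySem.List.pyRange start («end» + step) step
        let cur := PySem.Set.ofList ys
        some (ys ++ result.filter (fun y => !(PySem.Set.contains cur y)))
      | _, _ => none
    | _ => none
  else
    match PySem.Int.ofStr? part with
    | some y =>
      let ys := [y]
      let cur := PySem.Set.ofList ys
      some (ys ++ result.filter (fun z => !(PySem.Set.contains cur z)))
    | none => none

def parse_years_arg_alt (value : String) : List Int :=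
  match (((PySem.Str.split? value ",").getD []).reverse).foldl
      (fun acc part => acc.bind (fun result => pyB_step result (PySem.Str.strip part))) (some []) with
  | some r => r
  | none => []

-- ===== PRECONDITION & SPEC =====
-- Does int() succeed everywhere this part needs it? (closed-form shape check on the input)
def pvPartOk (part0 : String) : Bool :=
  let part := PySem.Str.strip part0
  if PySem.Str.len part = 0 then true
  else if PySem.Str.isIn "-" part then
    match PySem.Str.splitMax? part "-" 1 with
    | some [start_raw, end_raw] => (PySem.Int.ofStr? start_raw).isSome && (PySem.Int.ofStr? end_raw).isSome
    | _ => false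
  else (PySem.Int.ofStr? part).isSome

-- Pre_ excludes exactly the inputs where A raises ValueError (some non-empty part, or one of
-- the two halves of a range part, is not a valid int literal); it excludes no input on which A returns.
def Pre_parse_years_arg (value : String) : Prop :=
  ∀ part ∈ (PySem.Str.split? value ",").getD [], pvPartOk part = true
instance (value : String) : Decidable (Pre_parse_years_arg value) := by
  unfold Pre_parse_years_arg; infer_instance

def pvWitness_parse_years_arg : String := "3, 1-2 ,3"

def Spec_parse_years_arg (value : String) (out : List Int) : Prop := out = parse_years_arg_alt value
instance (value : String) (out : List Int) : Decidable (Spec_parse_years_arg value out) := by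
  unfold Spec_parse_years_arg; infer_instance

-- ===== CLAIM (what is proved, stated in full; the proofs are below) =====
def Claim_equal_parse_years_arg : Prop :=
  ∀ (value : String), Dom_parse_years_arg value → Pre_parse_years_arg value →
    Spec_parse_years_arg value (parse_years_arg value)

-- ===== LEMMAS AND PROOFS =====

-- the chunk of years a good (stripped) part contributes (proof-side view of one part)
def pvChunk? (p : String) : Option (List Int) :=
  if PySem.Str.len p = 0 then some []
  else if PySem.Str.isIn "-" p then
    match PySem.Str.splitMax? p "-" 1 with
    | some [start_raw, end_raw] =>
      match PySem.Int.ofStr? start_raw, PySem.Int.ofStr? end_raw with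
      | some start, some «end» =>
        let step : Int := if start ≤ «end» then 1 else -1
        some (PySem.List.pyRange start («end» + step) step)
      | _, _ => none
    | _ => none
  else
    match PySem.Int.ofStr? p with
    | some y => some [y]
    | none => none

def pvChunk (p : String) : List Int := (pvChunk? p).getD []

theorem pvChunk?_eq_some (p : String) (hp : pvPartOk p = true) :
    pvChunk? (PySem.Str.strip p) = some (pvChunk (PySem.Str.strip p)) := by
  unfold pvPartOk at hp
  simp only at hp
  unfold pvChunk pvChunk?
  split_ifs at hp ⊢ with h1 h2
  · rfl
  · rcases hsp : PySem.Str.splitMax? (PySem.Str.strip p) "-" 1 with _ | l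
    · simp_all
    · match l with
      | [] => simp_all
      | [a] => simp_all
      | a :: b :: c :: t => simp_all
      | [a, b] =>
        rcases ha : PySem.Int.ofStr? a with _ | x <;> rcases hb : PySem.Int.ofStr? b with _ | y <;>
          simp_all
  · rcases ha : PySem.Int.ofStr? (PySem.Str.strip p) with _ | x <;> simp_all

-- every chunk (empty part, a range, or a single year) is duplicate-free
theorem pvChunk_nodup (p : String) (c : List Int) (h : pvChunk? p = some c) : c.Nodup := by
  unfold pvChunk? at h
  split_ifs at h with h1 h2
  · simp_all
  · rcases hsp : PySem.Str.splitMax? p "-" 1 with _ | l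
    · simp_all
    · match l with
      | [] => simp_all
      | [a] => simp_all
      | a :: b :: c' :: t => simp_all
      | [a, b] =>
        rcases ha : PySem.Int.ofStr? a with _ | x <;> rcases hb : PySem.Int.ofStr? b with _ | y <;>
          simp_all
        by_cases hle : x ≤ y
        · simp only [if_pos hle] at h
          rw [← h]
          exact PySem.List.nodup_pyRange_one x (y + 1)
        · simp only [if_neg hle] at h
          rw [← h, PySem.List.pyRange_neg_one_eq_reverse, List.nodup_reverse]
          exact PySem.List.nodup_pyRange_one (y + -1 + 1) (x + 1)
  · rcases ha : PySem.Int.ofStr? p with _ | x <;> simp_all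
    rw [← h]
    exact List.nodup_singleton x

-- ---- A side ----

theorem pyA_add_diag (l : List Int) (y : Int) :
    pyA_add (l, l) y = (PySem.Set.add l y, PySem.Set.add l y) := by
  unfold pyA_add PySem.Set.add
  simp only [PySem.Set.contains]
  by_cases h : l.contains y <;> simp_all

theorem foldl_pyA_add_diag (ys : List Int) (l : List Int) :
    ys.foldl pyA_add (l, l) = (PySem.Set.update l ys, PySem.Set.update l ys) := by
  induction ys generalizing l with
  | nil => rfl
  | cons y ys ih =>
    rw [List.foldl_cons, pyA_add_diag, ih]
    rfl

-- A's loop body on a good part moves the diagonal state by Set.update with the part's chunk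
theorem pyA_part_diag (p : String) (hp : pvPartOk p = true) (l : List Int) :
    pyA_part (l, l) (PySem.Str.strip p) =
      some (PySem.Set.update l (pvChunk (PySem.Str.strip p)),
            PySem.Set.update l (pvChunk (PySem.Str.strip p))) := by
  unfold pvPartOk at hp
  simp only at hp
  unfold pyA_part pvChunk pvChunk?
  split_ifs at hp ⊢ with h1 h2
  · rfl
  · rcases hsp : PySem.Str.splitMax? (PySem.Str.strip p) "-" 1 with _ | l'
    · simp_all
    · match l' with
      | [] => simp_all
      | [a] => simp_all
      | a :: b :: c :: t => simp_all
      | [a, b] =>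
        rcases ha : PySem.Int.ofStr? a with _ | x <;> rcases hb : PySem.Int.ofStr? b with _ | y <;>
          simp_all [foldl_pyA_add_diag]
  · rcases ha : PySem.Int.ofStr? (PySem.Str.strip p) with _ | x <;>
      simp_all [pyA_add_diag, PySem.Set.update]

theorem pyA_fold (parts : List String) (h : ∀ p ∈ parts, pvPartOk p = true) (l : List Int) :
    parts.foldl (fun acc part => acc.bind (fun st => pyA_part st (PySem.Str.strip part))) (some (l, l)) =
      some (PySem.Set.update l ((parts.map (fun p => pvChunk (PySem.Str.strip p))).flatten),
            PySem.Set.update l ((parts.map (fun p => pvChunk (PySem.Str.strip p))).flatten)) := by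
  induction parts generalizing l with
  | nil => simp
  | cons p parts ih =>
    rw [List.foldl_cons]
    simp only [Option.bind_some]
    rw [pyA_part_diag p (h p List.mem_cons_self) l,
      ih (fun q hq => h q (List.mem_cons_of_mem _ hq)) (PySem.Set.update l (pvChunk (PySem.Str.strip p)))]
    simp [PySem.Set.update, List.foldl_append]

-- ---- B side ----

-- B's loop body on a good part merges exactly the part's chunk in front of the suffix
theorem pyB_step_merge (p : String) (hp : pvPartOk p = true) (r : List Int) :
    pyB_step r (PySem.Str.strip p) =
      some (pvChunk (PySem.Str.strip p) ++
            r.filter (fun y => !(PySem.Set.contains (PySem.Set.ofList (pvChunk (PySem.Str.strip p))) y))) := by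
  unfold pvPartOk at hp
  simp only at hp
  unfold pyB_step pvChunk pvChunk?
  split_ifs at hp ⊢ with h1 h2
  · simp [PySem.Set.contains]
  · rcases hsp : PySem.Str.splitMax? (PySem.Str.strip p) "-" 1 with _ | l'
    · simp_all
    · match l' with
      | [] => simp_all
      | [a] => simp_all
      | a :: b :: c :: t => simp_all
      | [a, b] =>
        rcases ha : PySem.Int.ofStr? a with _ | x <;> rcases hb : PySem.Int.ofStr? b with _ | y <;>
          simp_all
  · rcases ha : PySem.Int.ofStr? (PySem.Str.strip p) with _ | x <;> simp_all

-- merging a duplicate-free chunk in front of an already-deduplicated suffix is first-occurrence dedup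
theorem merge_eq_ofList_append (c zs : List Int) (hc : c.Nodup) :
    c ++ (PySem.Set.ofList zs).filter (fun y => !(PySem.Set.contains (PySem.Set.ofList c) y)) =
      PySem.Set.ofList (c ++ zs) := by
  rw [PySem.Set.ofList_append, PySem.Set.update_eq_append_filter]
  simp [PySem.Set.ofList_eq_self_of_nodup c hc]

theorem pyB_fold (parts : List String) (h : ∀ p ∈ parts, pvPartOk p = true) :
    (parts.reverse).foldl
        (fun acc part => acc.bind (fun result => pyB_step result (PySem.Str.strip part))) (some []) =
      some (PySem.Set.ofList ((parts.map (fun p => pvChunk (PySem.Str.strip p))).flatten)) := by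
  rw [List.foldl_reverse]
  induction parts with
  | nil => rfl
  | cons p parts ih =>
    rw [List.foldr_cons, ih (fun q hq => h q (List.mem_cons_of_mem _ hq))]
    simp only [Option.bind_some]
    rw [pyB_step_merge p (h p List.mem_cons_self),
      merge_eq_ofList_append _ _ (pvChunk_nodup _ _ (pvChunk?_eq_some p (h p List.mem_cons_self)))]
    simp

-- ===== VERDICT (by name: the statement is the Claim_ definition above) =====
theorem parse_years_arg_spec : Claim_equal_parse_years_arg := by
  intro value _hdom hpre
  unfold Spec_parse_years_arg parse_years_arg parse_years_arg_alt
  rw [pyA_fold ((PySem.Str.split? value ",").getD []) hpre [],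
    pyB_fold ((PySem.Str.split? value ",").getD []) hpre]
  simp [PySem.Set.update_nil_left]
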